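-- pv_equiv track=rewrite | github.com/paiml/depyler | examples/hard_priority_queue_sim.py | simulate_task_scheduler
-- ===== SOURCE A (Python) =====
-- def pq_insert(priorities: list[int], values: list[int], priority: int, value: int) -> int:
--     """Insert an element into priority queue. Returns new size."""
--     priorities.append(priority)
--     values.append(value)
--     # Bubble into sorted position (insertion sort step)
--     pos: int = len(priorities) - 1
--     while pos > 0:
--         prev: int = pos - 1
--         if priorities[prev] > priorities[pos]:
--             tmp_p: int = priorities[prev]
--             priorities[prev] = priorities[pos]
--             priorities[pos] = tmp_p
--             tmp_v: int = values[prev]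
--             values[prev] = values[pos]
--             values[pos] = tmp_v
--             pos = pos - 1
--         else:
--             pos = 0
--     return len(priorities)
--
-- def pq_extract_min(priorities: list[int], values: list[int]) -> int:
--     """Extract the minimum priority element. Returns its value, or -1 if empty."""
--     if len(priorities) == 0:
--         return -1
--     val: int = values[0]
--     # Shift elements left
--     i: int = 1
--     while i < len(priorities):
--         prev: int = i - 1
--         priorities[prev] = priorities[i]
--         values[prev] = values[i]
--         i = i + 1
--     priorities.pop()
--     values.pop()
--     return val
--
-- def simulate_task_scheduler(task_priorities: list[int], task_ids: list[int]) -> list[int]: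
--     """Simulate a task scheduler that processes tasks by priority.
--     Returns order of task IDs processed."""
--     pq_p: list[int] = []
--     pq_v: list[int] = []
--     i: int = 0
--     while i < len(task_priorities):
--         pq_insert(pq_p, pq_v, task_priorities[i], task_ids[i])
--         i = i + 1
--     order: list[int] = []
--     while len(pq_p) > 0:
--         task_id: int = pq_extract_min(pq_p, pq_v)
--         order.append(task_id)
--     return order
-- ===== SOURCE B (Python) =====
-- def simulate_task_scheduler(task_priorities: list[int], task_ids: list[int]) -> list[int]:
--     """Simulate a task scheduler that processes tasks by priority.
--     Returns order of task IDs processed."""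
--     buckets: dict[int, list[int]] = {}
--     for priority, task_id in zip(task_priorities, task_ids):
--         buckets.setdefault(priority, []).append(task_id)
--     order: list[int] = []
--     for priority in sorted(buckets):
--         order.extend(buckets[priority])
--     return order
-- ===== Notes on version B (the rewrite author's own statement) =====
-- stated objective: faster
-- what changed: Replaces the in-place insertion-sort priority queue (quadratic bubble-insert plus shift-left extract-min loops) with a group-by-priority dict built in one zip pass and a single emission pass over the sorted distinct keys.
import Mathlib
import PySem

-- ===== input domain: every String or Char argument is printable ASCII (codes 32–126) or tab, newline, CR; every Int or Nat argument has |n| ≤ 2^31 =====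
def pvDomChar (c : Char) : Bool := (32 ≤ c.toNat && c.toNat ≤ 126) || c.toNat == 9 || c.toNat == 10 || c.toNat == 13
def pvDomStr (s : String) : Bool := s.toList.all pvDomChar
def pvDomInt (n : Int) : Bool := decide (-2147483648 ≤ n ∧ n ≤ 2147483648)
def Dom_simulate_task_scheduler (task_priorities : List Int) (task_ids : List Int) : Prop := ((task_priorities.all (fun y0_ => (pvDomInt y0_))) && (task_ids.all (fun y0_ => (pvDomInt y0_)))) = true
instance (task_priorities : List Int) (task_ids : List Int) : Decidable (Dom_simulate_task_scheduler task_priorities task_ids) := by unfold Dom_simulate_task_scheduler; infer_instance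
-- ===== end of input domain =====

-- B replaces A's quadratic in-place insertion-sort priority queue with a group-by-priority
-- dict plus one emission pass over the sorted distinct priorities (objective: faster).


-- ===== PORT A =====
-- the bubble-left 'while pos > 0' loop of pq_insert, recursing on pos
def pqBubble (ps vs : List Int) (pos : Nat) : List Int × List Int :=
  match pos with
  | 0 => (ps, vs)
  | prev + 1 =>
    if ps.getD prev 0 > ps.getD (prev + 1) 0 then
      pqBubble ((ps.set prev (ps.getD (prev + 1) 0)).set (prev + 1) (ps.getD prev 0))
               ((vs.set prev (vs.getD (prev + 1) 0)).set (prev + 1) (vs.getD prev 0)) prev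
    else (ps, vs)

-- pq_insert: append, then bubble from pos = len - 1.  (Python also returns the new
-- size; the caller ignores it, the port returns the mutated lists, i.e. the effect.)
def pq_insert (ps vs : List Int) (priority value : Int) : List Int × List Int :=
  pqBubble (ps ++ [priority]) (vs ++ [value]) ps.length

-- the shift-left 'while i < len' loop of pq_extract_min; the loop guard i < len is
-- kept, fuel is its exact iteration count (set preserves length, so len is fixed)
def pqShift (fuel : Nat) (ps vs : List Int) (i : Nat) : List Int × List Int :=
  match fuel with
  | 0 => (ps, vs)
  | fuel + 1 =>
    if i < ps.length then
      pqShift fuel (ps.set (i - 1) (ps.getD i 0)) (vs.set (i - 1) (vs.getD i 0)) (i + 1)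
    else (ps, vs)

-- pq_extract_min: returns (value, mutated priorities, mutated values)
def pq_extract_min (ps vs : List Int) : Int × List Int × List Int :=
  if ps.length = 0 then (-1, ps, vs)
  else
    let val := vs.getD 0 0
    let r := pqShift (ps.length - 1) ps vs 1
    (val, r.1.dropLast, r.2.dropLast)

-- the 'while len(pq_p) > 0' extraction loop of simulate_task_scheduler; the guard is
-- kept, fuel is its exact iteration count (each extraction shortens the queue by one)
def schedLoop (fuel : Nat) (ps vs order : List Int) : List Int :=
  match fuel with
  | 0 => order
  | fuel + 1 =>
    if 0 < ps.length then
      let r := pq_extract_min ps vs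
      schedLoop fuel r.2.1 r.2.2 (order ++ [r.1])
    else order

def simulate_task_scheduler (task_priorities : List Int) (task_ids : List Int) : List Int :=
  let st := (PySem.List.pyRange 0 task_priorities.length).foldl
    (fun s i => pq_insert s.1 s.2 (PySem.List.pyGetD task_priorities i 0)
                                  (PySem.List.pyGetD task_ids i 0)) ([], [])
  schedLoop st.1.length st.1 st.2 []

-- ===== PORT B =====
def simulate_task_scheduler_alt (task_priorities : List Int) (task_ids : List Int) : List Int :=
  let buckets := (task_priorities.zip task_ids).foldl
    (fun d pt => d.modify pt.1 [] (fun l => l ++ [pt.2]))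
    (PySem.Dict.empty : PySem.Dict Int (List Int))
  (PySem.List.sorted buckets.keys (fun k => k)).foldl
    (fun order k => order ++ buckets.getD k []) []   -- every emitted key is present

-- ===== PRECONDITION & SPEC =====
-- Pre_ excludes exactly the inputs where A raises IndexError (task_ids shorter than task_priorities).
def Pre_simulate_task_scheduler (task_priorities : List Int) (task_ids : List Int) : Prop :=
  task_priorities.length ≤ task_ids.length
instance (task_priorities : List Int) (task_ids : List Int) : Decidable (Pre_simulate_task_scheduler task_priorities task_ids) := by unfold Pre_simulate_task_scheduler; infer_instance

def pvWitness_simulate_task_scheduler : List Int × List Int := ([2, 1, 2, 1], [10, 20, 30, 40])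

def Spec_simulate_task_scheduler (task_priorities : List Int) (task_ids : List Int) (out : List Int) : Prop := out = simulate_task_scheduler_alt task_priorities task_ids
instance (task_priorities : List Int) (task_ids : List Int) (out : List Int) : Decidable (Spec_simulate_task_scheduler task_priorities task_ids out) := by unfold Spec_simulate_task_scheduler; infer_instance

-- ===== CLAIM (what is proved, stated in full; the proofs are below) =====
def Claim_equal_simulate_task_scheduler : Prop := ∀ (task_priorities : List Int) (task_ids : List Int), Dom_simulate_task_scheduler task_priorities task_ids → Pre_simulate_task_scheduler task_priorities task_ids → Spec_simulate_task_scheduler task_priorities task_ids (simulate_task_scheduler task_priorities task_ids)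


-- ===== LEMMAS AND PROOFS =====

-- the insertion order used by Python's stable sort with key = fst
def pvBef (a b : Int × Int) : Bool := decide (a.1 < b.1)

-- the grouped ("bucketed") form both programs compute
def pvG (pairs : List (Int × Int)) : List (Int × Int) :=
  (PySem.List.sorted (PySem.List.dedup (pairs.map Prod.fst)) (fun k => k)).flatMap
    (fun x => pairs.filter (fun y => y.1 == x))

-- ---- A's bubble step is a stable sorted-insert ----

theorem pqBubble_append (ps vs e f : List Int) (pos : Nat)
    (hp : pos < ps.length) (hv : pos < vs.length) :
    pqBubble (ps ++ e) (vs ++ f) pos =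
      ((pqBubble ps vs pos).1 ++ e, (pqBubble ps vs pos).2 ++ f) := by
  induction pos generalizing ps vs with
  | zero => simp [pqBubble]
  | succ prev ih =>
    have hset : ∀ (l : List Int) (a b : Int) (el : List Int), prev + 1 < l.length →
        ((l ++ el).set prev a).set (prev + 1) b = ((l.set prev a).set (prev + 1) b) ++ el := by
      intro l a b el h
      rw [List.set_append, if_pos (by omega), List.set_append,
        if_pos (by simp only [List.length_set]; omega)]
    rw [pqBubble, pqBubble]
    simp only [List.getD_append _ _ _ _ (show prev < ps.length by omega),
      List.getD_append _ _ _ _ hp, List.getD_append _ _ _ _ (show prev < vs.length by omega),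
      List.getD_append _ _ _ _ hv]
    split
    · rw [hset ps _ _ e hp, hset vs _ _ f hv]
      exact ih _ _ (by simp only [List.length_set]; omega) (by simp only [List.length_set]; omega)
    · rfl

theorem insertBy_last_of_before {α : Type} (bef : α → α → Bool) (x z : α) (l : List α)
    (h : bef x z = true) :
    PySem.List.insertBy bef x (l ++ [z]) = PySem.List.insertBy bef x l ++ [z] := by
  induction l with
  | nil => simp [PySem.List.insertBy, h]
  | cons y ys ih =>
    simp only [List.cons_append, PySem.List.insertBy]
    split <;> simp [ih]

theorem bubble_insert (L : List (Int × Int)) (p v : Int)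
    (hs : List.Pairwise (fun a b => a.1 ≤ b.1) L) :
    pqBubble (L.map Prod.fst ++ [p]) (L.map Prod.snd ++ [v]) L.length =
      ((PySem.List.insertBy pvBef (p, v) L).map Prod.fst,
       (PySem.List.insertBy pvBef (p, v) L).map Prod.snd) := by
  induction L using List.reverseRecOn with
  | nil => simp [pqBubble, PySem.List.insertBy]
  | append_singleton M qw ih =>
    obtain ⟨q, w⟩ := qw
    rw [List.pairwise_append] at hs
    obtain ⟨hM, _, hle⟩ := hs
    have hq : ∀ a ∈ M, a.1 ≤ q := fun a ha => hle a ha (q, w) (by simp)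
    have hlen : (M ++ [(q, w)]).length = M.length + 1 := by simp
    rw [hlen, pqBubble]
    have e1 : (M ++ [(q, w)]).map Prod.fst ++ [p] = M.map Prod.fst ++ ([q] ++ [p]) := by simp
    have e2 : (M ++ [(q, w)]).map Prod.snd ++ [v] = M.map Prod.snd ++ ([w] ++ [v]) := by simp
    have hlf : (M.map Prod.fst).length = M.length := by simp
    have hls : (M.map Prod.snd).length = M.length := by simp
    have g1 : ((M ++ [(q, w)]).map Prod.fst ++ [p]).getD M.length 0 = q := by
      rw [e1, List.getD_append_right _ _ _ _ (by rw [hlf])]; simp [hlf]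
    have g2 : ((M ++ [(q, w)]).map Prod.fst ++ [p]).getD (M.length + 1) 0 = p := by
      rw [e1, List.getD_append_right _ _ _ _ (by rw [hlf]; omega)]; simp [hlf]
    have g3 : ((M ++ [(q, w)]).map Prod.snd ++ [v]).getD M.length 0 = w := by
      rw [e2, List.getD_append_right _ _ _ _ (by rw [hls])]; simp [hls]
    have g4 : ((M ++ [(q, w)]).map Prod.snd ++ [v]).getD (M.length + 1) 0 = v := by
      rw [e2, List.getD_append_right _ _ _ _ (by rw [hls]; omega)]; simp [hls]
    rw [g1, g2, g3, g4]
    split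
    · -- q > p : swap the two tails and keep bubbling
      rename_i hgt
      have s1 : (((M ++ [(q, w)]).map Prod.fst ++ [p]).set M.length p).set (M.length + 1) q
          = (M.map Prod.fst ++ [p]) ++ [q] := by
        rw [e1, List.set_append, if_neg (by rw [hlf]; omega), List.set_append,
          if_neg (by rw [hlf]; omega)]
        simp [hlf]
      have s2 : (((M ++ [(q, w)]).map Prod.snd ++ [v]).set M.length v).set (M.length + 1) w
          = (M.map Prod.snd ++ [v]) ++ [w] := by
        rw [e2, List.set_append, if_neg (by rw [hls]; omega), List.set_append,
          if_neg (by rw [hls]; omega)]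
        simp [hls]
      rw [s1, s2, pqBubble_append _ _ _ _ _ (by simp) (by simp), ih hM,
        insertBy_last_of_before _ _ _ _ (by simp [pvBef]; omega)]
      simp
    · -- q ≤ p : the new element is already in place
      rename_i hle'
      rw [PySem.List.insertBy_of_forall_not_before]
      · simp
      · intro y hy
        simp only [List.mem_append, List.mem_singleton] at hy
        rcases hy with hy | hy
        · simp only [pvBef, decide_eq_false_iff_not, not_lt]
          exact le_trans (hq y hy) (by omega)
        · subst hy; simp only [pvBef, decide_eq_false_iff_not, not_lt]; omega

theorem sorted_append_one (xs : List (Int × Int)) (x : Int × Int) :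
    PySem.List.sorted (xs ++ [x]) Prod.fst =
      PySem.List.insertBy pvBef x (PySem.List.sorted xs Prod.fst) := by
  rw [PySem.List.sorted_eq_foldl_insertBy, PySem.List.sorted_eq_foldl_insertBy,
    List.foldl_append]
  rfl

theorem insert_loop_sorted (pairs : List (Int × Int)) :
    pairs.foldl (fun s x => pq_insert s.1 s.2 x.1 x.2) (([], []) : List Int × List Int) =
      ((PySem.List.sorted pairs Prod.fst).map Prod.fst,
       (PySem.List.sorted pairs Prod.fst).map Prod.snd) := by
  induction pairs using List.reverseRecOn with
  | nil => rfl
  | append_singleton S x ih =>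
    rw [List.foldl_append, ih]
    simp only [List.foldl_cons, List.foldl_nil]
    rw [pq_insert, List.length_map]
    rw [bubble_insert (PySem.List.sorted S Prod.fst) x.1 x.2
      (PySem.List.sorted_pairwise S Prod.fst), sorted_append_one]

-- ---- A's index loop is the fold over the zipped pairs ----

theorem foldl_range_zip_aux (tps tids : List Int) {α : Type} (f : α → Int → Int → α)
    (h : tps.length ≤ tids.length) :
    ∀ (n : Nat) (a : Int) (init : α), 0 ≤ a → a.toNat + n = tps.length →
    (PySem.List.pyRange a tps.length).foldl
        (fun s i => f s (PySem.List.pyGetD tps i 0) (PySem.List.pyGetD tids i 0)) init =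
      ((tps.drop a.toNat).zip (tids.drop a.toNat)).foldl (fun s x => f s x.1 x.2) init := by
  intro n
  induction n with
  | zero =>
    intro a init h0 hn
    have : PySem.List.pyRange a tps.length = [] := by
      simp [PySem.List.pyRange]; omega
    rw [this, List.drop_eq_nil_of_le (by omega)]
    simp
  | succ m ih =>
    intro a init h0 hn
    have hlt : a < (tps.length : Int) := by omega
    rw [PySem.List.pyRange_one_cons hlt]
    simp only [List.foldl_cons]
    rw [PySem.List.pyGetD_eq_getElem _ _ h0 hlt,
      PySem.List.pyGetD_eq_getElem _ _ h0 (by omega),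
      List.drop_eq_getElem_cons (l := tps) (by omega),
      List.drop_eq_getElem_cons (l := tids) (by omega),
      List.zip_cons_cons, List.foldl_cons]
    have := ih (a + 1) (f init tps[a.toNat] tids[a.toNat]) (by omega) (by omega)
    rw [show (a + 1).toNat = a.toNat + 1 by omega] at this
    exact this

theorem foldl_range_zip (tps tids : List Int) {α : Type} (f : α → Int → Int → α) (init : α)
    (h : tps.length ≤ tids.length) :
    (PySem.List.pyRange 0 tps.length).foldl
        (fun s i => f s (PySem.List.pyGetD tps i 0) (PySem.List.pyGetD tids i 0)) init =
      (tps.zip tids).foldl (fun s x => f s x.1 x.2) init := by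
  have := foldl_range_zip_aux tps tids f h tps.length 0 init (by omega) (by simp)
  simpa using this

-- ---- A's extraction loop emits the queued values in order ----

theorem pqShift_step (l : List Int) (j : Nat) (hj : 1 ≤ j) (hjl : j < l.length) :
    (l.set (j - 1) (l.getD j 0)).take j ++ (l.set (j - 1) (l.getD j 0)).drop (j + 1)
      ++ [(l.set (j - 1) (l.getD j 0)).getD ((l.set (j - 1) (l.getD j 0)).length - 1) 0]
    = l.take (j - 1) ++ l.drop j ++ [l.getD (l.length - 1) 0] := by
  have e1 : (l.set (j - 1) (l.getD j 0)).drop (j + 1) = l.drop (j + 1) := by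
    rw [List.drop_set, if_pos (by omega)]
  have e2 : (l.set (j - 1) (l.getD j 0)).getD ((l.set (j - 1) (l.getD j 0)).length - 1) 0
      = l.getD (l.length - 1) 0 := by
    simp only [List.length_set]
    rw [List.getD_eq_getElem (n := l.length - 1) _ _ (by simp only [List.length_set]; omega),
      List.getD_eq_getElem (n := l.length - 1) _ _ (by omega)]
    exact List.getElem_set_ne (by omega) _
  have e3 : (l.set (j - 1) (l.getD j 0)).take j = l.take (j - 1) ++ [l.getD j 0] := by
    rw [List.take_set]
    have : j = (j - 1) + 1 := by omega
    rw [this, List.take_add_one, List.getElem?_eq_getElem (by omega)]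
    rw [List.set_append, if_neg (by simp [List.length_take])]
    simp [List.length_take, Nat.min_eq_left (by omega : j - 1 ≤ l.length)]
  have e4 : l.drop j = l.getD j 0 :: l.drop (j + 1) := by
    rw [List.drop_eq_getElem_cons hjl, List.getD_eq_getElem _ _ hjl]
  rw [e1, e2, e3, e4]; simp

theorem pqShift_spec (fuel : Nat) (ps vs : List Int) (i : Nat)
    (hf : fuel = ps.length - i) (hlen : ps.length = vs.length)
    (h1 : 1 ≤ i) (h2 : i ≤ ps.length) :
    pqShift fuel ps vs i =
      (ps.take (i - 1) ++ ps.drop i ++ [ps.getD (ps.length - 1) 0],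
       vs.take (i - 1) ++ vs.drop i ++ [vs.getD (vs.length - 1) 0]) := by
  induction fuel generalizing ps vs i with
  | zero =>
    have eq1 : ∀ (l : List Int), l.length = i →
        l.take (i - 1) ++ l.drop i ++ [l.getD (l.length - 1) 0] = l := by
      intro l hl
      have hne : l ≠ [] := by intro e; subst e; simp at hl; omega
      rw [List.drop_eq_nil_of_le (by omega),
        List.getD_eq_getElem (n := l.length - 1) _ _ (by omega),
        show i - 1 = l.length - 1 by omega]
      simp only [List.append_nil]
      rw [← List.dropLast_eq_take, ← List.getLast_eq_getElem hne]
      exact List.dropLast_concat_getLast hne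
    rw [pqShift, eq1 ps (by omega), eq1 vs (by omega)]
  | succ fuel ih =>
    have hlt : i < ps.length := by omega
    rw [pqShift, if_pos hlt]
    rw [ih _ _ (i + 1) (by simp; omega) (by simp [hlen]) (by omega) (by simp; omega)]
    rw [show i + 1 - 1 = i by omega]
    rw [pqShift_step ps i h1 hlt, pqShift_step vs i h1 (by omega)]

theorem schedLoop_spec (S : List (Int × Int)) (acc : List Int) :
    schedLoop S.length (S.map Prod.fst) (S.map Prod.snd) acc = acc ++ S.map Prod.snd := by
  induction S generalizing acc with
  | nil => simp [schedLoop]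
  | cons x T ih =>
    rw [List.length_cons, schedLoop, if_pos (by simp)]
    have hext : pq_extract_min ((x :: T).map Prod.fst) ((x :: T).map Prod.snd)
        = (x.2, T.map Prod.fst, T.map Prod.snd) := by
      rw [pq_extract_min, if_neg (by simp)]
      simp only
      rw [pqShift_spec _ _ _ 1 (by simp) (by simp) (le_refl _) (by simp)]
      simp
    rw [hext]
    simp only
    rw [ih]
    simp

-- ---- the stable sort is the grouped ("bucketed") form ----

theorem insertBy_all_before {α : Type} (bef : α → α → Bool) (x : α) (l : List α)
    (h : ∀ y ∈ l, bef x y = true) : PySem.List.insertBy bef x l = x :: l := by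
  cases l with
  | nil => rfl
  | cons y ys => rw [PySem.List.insertBy, if_pos (h y (by simp))]

theorem insertBy_append_left {α : Type} (bef : α → α → Bool) (x : α) (l1 l2 : List α)
    (h : ∀ y ∈ l1, bef x y = false) :
    PySem.List.insertBy bef x (l1 ++ l2) = l1 ++ PySem.List.insertBy bef x l2 := by
  induction l1 with
  | nil => rfl
  | cons y ys ih =>
    rw [List.cons_append, PySem.List.insertBy, if_neg (by simp [h y (by simp)])]
    simp only [List.cons_append, List.cons.injEq, true_and]
    exact ih (fun z hz => h z (by simp [hz]))

theorem insert_grouped (K : List Int) (hK : List.Pairwise (· < ·) K) (p v : Int)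
    (B : Int → List (Int × Int)) (hB : ∀ k ∈ K, ∀ y ∈ B k, y.1 = k) :
    PySem.List.insertBy pvBef (p, v) (K.flatMap B) =
      if p ∈ K then K.flatMap (fun k => if k = p then B k ++ [(p, v)] else B k)
      else (PySem.List.insertBy (fun a b => decide (a < b)) p K).flatMap
             (fun k => if k = p then [(p, v)] else B k) := by
  induction K with
  | nil => simp [PySem.List.insertBy]
  | cons k rest ih =>
    have hkrest : ∀ j ∈ rest, k < j := fun j hj => (List.pairwise_cons.mp hK).1 j hj
    have hrest : List.Pairwise (· < ·) rest := (List.pairwise_cons.mp hK).2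
    have hBk : ∀ y ∈ B k, y.1 = k := hB k (by simp)
    have hBr : ∀ j ∈ rest, ∀ y ∈ B j, y.1 = j := fun j hj => hB j (by simp [hj])
    rw [List.flatMap_cons]
    rcases lt_trichotomy p k with hpk | hpk | hpk
    · -- p < k : the new pair goes in front
      have hnotmem : p ∉ k :: rest := by
        intro hm; rcases List.mem_cons.mp hm with rfl | hm
        · omega
        · exact absurd (hkrest p hm) (by omega)
      rw [if_neg hnotmem]
      rw [insertBy_all_before _ _ _ (by
        intro y hy
        simp only [List.mem_append, List.mem_flatMap] at hy
        simp only [pvBef, decide_eq_true_eq]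
        rcases hy with hy | ⟨j, hj, hy⟩
        · rw [hBk y hy]; exact hpk
        · rw [hBr j hj y hy]; exact lt_trans hpk (hkrest j hj))]
      rw [insertBy_all_before _ _ _ (by
        intro y hy
        simp only [List.mem_cons] at hy
        rcases hy with rfl | hy
        · simp; omega
        · simp; exact lt_trans hpk (hkrest y hy))]
      rw [List.flatMap_cons, List.flatMap_cons]
      rw [if_pos rfl, if_neg (by omega)]
      have : rest.flatMap (fun j => if j = p then [(p, v)] else B j) = rest.flatMap B := by
        apply List.flatMap_congr
        intro j hj
        rw [if_neg (by have := hkrest j hj; omega)]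
      rw [this]
      simp
    · -- p = k : append at the end of this bucket
      subst hpk
      rw [if_pos (by simp)]
      rw [insertBy_append_left _ _ _ _ (by
        intro y hy; simp only [pvBef, decide_eq_false_iff_not, not_lt]; rw [hBk y hy])]
      rw [insertBy_all_before _ _ _ (by
        intro y hy
        simp only [List.mem_flatMap] at hy
        obtain ⟨j, hj, hy⟩ := hy
        simp only [pvBef, decide_eq_true_eq]
        rw [hBr j hj y hy]; exact hkrest j hj)]
      rw [List.flatMap_cons, if_pos rfl]
      have : rest.flatMap (fun j => if j = p then B j ++ [(p, v)] else B j) = rest.flatMap B := by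
        apply List.flatMap_congr
        intro j hj
        rw [if_neg (by have := hkrest j hj; omega)]
      rw [this]
      simp
    · -- k < p : skip this bucket
      rw [insertBy_append_left _ _ _ _ (by
        intro y hy; simp only [pvBef, decide_eq_false_iff_not, not_lt]; rw [hBk y hy]; omega)]
      rw [ih hrest hBr]
      by_cases hmem : p ∈ rest
      · rw [if_pos hmem, if_pos (by simp [hmem]), List.flatMap_cons, if_neg (by omega)]
      · rw [if_neg hmem, if_neg (by simp [hmem]; omega)]
        rw [PySem.List.insertBy, if_neg (by simp; omega), List.flatMap_cons, if_neg (by omega)]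

theorem sortedK_append_one (l : List Int) (p : Int) :
    PySem.List.sorted (l ++ [p]) (fun k => k) =
      PySem.List.insertBy (fun a b => decide (a < b)) p (PySem.List.sorted l (fun k => k)) := by
  rw [PySem.List.sorted_eq_foldl_insertBy, PySem.List.sorted_eq_foldl_insertBy,
    List.foldl_append]
  rfl

theorem sortedK_lt (l : List Int) :
    List.Pairwise (· < ·) (PySem.List.sorted (PySem.List.dedup l) (fun k => k)) := by
  have h1 := PySem.List.sorted_pairwise (PySem.List.dedup l) (fun k => k)
  have h2 : (PySem.List.sorted (PySem.List.dedup l) (fun k => k)).Nodup :=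
    (PySem.List.sorted_perm (PySem.List.dedup l) (fun k => k) false).symm.nodup
      (PySem.List.nodup_dedup l)
  exact (h1.and h2).imp (fun h => lt_of_le_of_ne h.1 h.2)

theorem mem_sortedK (l : List Int) (p : Int) :
    p ∈ PySem.List.sorted (PySem.List.dedup l) (fun k => k) ↔ p ∈ l := by
  rw [(PySem.List.sorted_perm (PySem.List.dedup l) (fun k => k) false).mem_iff,
    PySem.List.mem_dedup]

theorem dedup_append_one_mem (l : List Int) (p : Int) (h : p ∈ l) :
    PySem.List.dedup (l ++ [p]) = PySem.List.dedup l := by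
  show PySem.Set.ofList (l ++ [p]) = PySem.Set.ofList l
  rw [PySem.Set.ofList_eq_foldl, List.foldl_append, ← PySem.Set.ofList_eq_foldl]
  show PySem.Set.add _ p = _
  rw [PySem.Set.add, if_pos]
  exact List.elem_eq_true_of_mem ((PySem.Set.mem_ofList l p).mpr h)

theorem dedup_append_one_not_mem (l : List Int) (p : Int) (h : p ∉ l) :
    PySem.List.dedup (l ++ [p]) = PySem.List.dedup l ++ [p] := by
  show PySem.Set.ofList (l ++ [p]) = PySem.Set.ofList l ++ [p]
  rw [PySem.Set.ofList_eq_foldl, List.foldl_append, ← PySem.Set.ofList_eq_foldl]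
  show PySem.Set.add _ p = _
  rw [PySem.Set.add, if_neg]
  intro hc
  exact h ((PySem.Set.mem_ofList l p).mp (List.mem_of_elem_eq_true hc))

theorem insert_pvG (xs : List (Int × Int)) (p v : Int) :
    PySem.List.insertBy pvBef (p, v) (pvG xs) = pvG (xs ++ [(p, v)]) := by
  unfold pvG
  have hB : ∀ k ∈ PySem.List.sorted (PySem.List.dedup (xs.map Prod.fst)) (fun k => k),
      ∀ y ∈ xs.filter (fun y => y.1 == k), y.1 = k := by
    intro k _ y hy
    simpa using List.of_mem_filter hy
  rw [insert_grouped _ (sortedK_lt _) p v _ hB]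
  have hfil : ∀ k : Int, (xs ++ [(p, v)]).filter (fun y => y.1 == k)
      = xs.filter (fun y => y.1 == k) ++ if p = k then [(p, v)] else [] := by
    intro k
    rw [List.filter_append]
    congr 1
    by_cases hpk : p = k <;> simp [hpk]
  by_cases hmem : p ∈ xs.map Prod.fst
  · rw [if_pos ((mem_sortedK _ _).mpr hmem)]
    rw [show (xs ++ [(p, v)]).map Prod.fst = xs.map Prod.fst ++ [p] by simp,
      dedup_append_one_mem _ _ hmem]
    apply List.flatMap_congr
    intro k hk
    rw [hfil k]
    by_cases hkp : k = p
    · subst hkp; rw [if_pos rfl, if_pos rfl]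
    · rw [if_neg hkp, if_neg (fun h => hkp h.symm)]; simp
  · rw [if_neg (fun h => hmem ((mem_sortedK _ _).mp h))]
    rw [show (xs ++ [(p, v)]).map Prod.fst = xs.map Prod.fst ++ [p] by simp,
      dedup_append_one_not_mem _ _ hmem, sortedK_append_one]
    apply List.flatMap_congr
    intro k hk
    rw [hfil k]
    by_cases hkp : k = p
    · subst hkp
      rw [if_pos rfl, if_pos rfl]
      have : xs.filter (fun y => y.1 == k) = [] := by
        rw [List.filter_eq_nil_iff]
        intro y hy hc
        exact hmem (List.mem_map.mpr ⟨y, hy, by simpa using hc⟩)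
      rw [this]; rfl
    · rw [if_neg hkp, if_neg (fun h => hkp h.symm)]; simp

theorem sorted_eq_pvG (pairs : List (Int × Int)) :
    PySem.List.sorted pairs Prod.fst = pvG pairs := by
  induction pairs using List.reverseRecOn with
  | nil => rfl
  | append_singleton xs x ih =>
    obtain ⟨p, v⟩ := x
    rw [sorted_append_one, ih, insert_pvG]

-- ---- B computes the values of the grouped form ----

theorem bucket_getD (L : List (Int × Int)) (d : PySem.Dict Int (List Int)) (k : Int) :
    (L.foldl (fun d pt => d.modify pt.1 [] (fun l => l ++ [pt.2])) d).getD k [] =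
      d.getD k [] ++ (L.filter (fun x => x.1 == k)).map Prod.snd := by
  induction L generalizing d with
  | nil => simp
  | cons x T ih =>
    rw [List.foldl_cons, ih]
    rw [PySem.Dict.modify, PySem.Dict.getD_insert]
    by_cases hk : k = x.1
    · rw [if_pos hk, List.filter_cons, if_pos (by simp [hk])]
      subst hk; simp
    · rw [if_neg hk, List.filter_cons, if_neg (by simp; exact fun h => hk h.symm)]

theorem alt_eq_pvG (tps tids : List Int) :
    simulate_task_scheduler_alt tps tids = (pvG (tps.zip tids)).map Prod.snd := by
  unfold simulate_task_scheduler_alt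
  simp only
  rw [PySem.Dict.keys_foldl_modify_key, PySem.Dict.keys_empty,
    show PySem.Set.update ([] : PySem.Set Int) ((tps.zip tids).map Prod.fst)
      = PySem.List.dedup ((tps.zip tids).map Prod.fst) from rfl,
    PySem.List.foldl_append_eq_flatMap, List.nil_append]
  unfold pvG
  rw [List.map_flatMap]
  apply List.flatMap_congr
  intro k hk
  rw [bucket_getD, PySem.Dict.getD_empty, List.nil_append]

-- ===== VERDICT (by name: the statement is the Claim_ definition above) =====
theorem simulate_task_scheduler_spec : Claim_equal_simulate_task_scheduler := by
  intro tps tids _hdom hpre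
  unfold Spec_simulate_task_scheduler
  show simulate_task_scheduler tps tids = _
  unfold simulate_task_scheduler
  rw [foldl_range_zip tps tids _ _ hpre, insert_loop_sorted]
  simp only [List.length_map]
  rw [schedLoop_spec, sorted_eq_pvG, alt_eq_pvG]
  simp
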